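-- pv_equiv track=rewrite | github.com/pentonvillefandango/CentaurParting | centaur/model_tests/models/test_watch_roots.py | _pick_path_column
-- ===== SOURCE A (Python) =====
-- from typing import Any, Dict, List, Optional, Sequence, Tuple
--
-- def _pick_path_column(cols: List[str]) -> Optional[str]:
--     # Heuristics: common names first
--     candidates = [
--         "root_path",
--         "watch_root",
--         "path",
--         "directory",
--         "dir",
--         "root",
--     ]
--     lower_to_actual = {c.lower(): c for c in cols}
--     for want in candidates:
--         if want in lower_to_actual:
--             return lower_to_actual[want]
--     return None
-- ===== SOURCE B (Python) =====
-- def _pick_path_column(cols):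
--     # Single pass over cols with an argmin accumulator: keep the column whose
--     # lowercase name has the best (smallest) priority rank; on ties (<=) the
--     # later column wins, matching A's last-wins dict semantics.
--     priority = {"root_path": 0, "watch_root": 1, "path": 2,
--                 "directory": 3, "dir": 4, "root": 5}
--     best = None  # (column, rank)
--     for c in cols:
--         r = priority.get(c.lower())
--         if r is not None and (best is None or r <= best[1]):
--             best = (c, r)
--     return best[0] if best is not None else None
-- ===== Notes on version B (the rewrite author's own statement) =====
-- stated objective: alternative
-- what changed: B replaces A's build-a-lowercase-dict-over-cols-then-scan-candidates structure by a single pass over cols with an argmin accumulator (column with the smallest priority rank, later wins ties), so no dict of columns is built and no candidate loop runs.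
import Mathlib
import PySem

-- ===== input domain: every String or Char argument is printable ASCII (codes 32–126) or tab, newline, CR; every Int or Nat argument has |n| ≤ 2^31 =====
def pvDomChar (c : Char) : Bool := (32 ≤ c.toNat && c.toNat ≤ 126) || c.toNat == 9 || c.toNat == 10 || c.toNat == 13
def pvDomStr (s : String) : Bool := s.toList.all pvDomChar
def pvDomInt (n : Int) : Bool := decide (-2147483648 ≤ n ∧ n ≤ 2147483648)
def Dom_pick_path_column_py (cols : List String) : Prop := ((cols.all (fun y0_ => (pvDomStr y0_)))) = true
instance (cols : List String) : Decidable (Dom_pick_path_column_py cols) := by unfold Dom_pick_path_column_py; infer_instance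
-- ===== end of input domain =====

-- B replaces A's lowercase->column dict plus candidate scan by a single pass over cols
-- with an argmin-by-priority accumulator (later column wins ties); same return value.

-- ===== PORT A =====
def pvCandidates : List String :=
  ["root_path", "watch_root", "path", "directory", "dir", "root"]

-- the 'for want in candidates: if want in lower_to_actual: return lower_to_actual[want]' loop
def pvALoop (d : PySem.Dict String String) : List String → Option String
  | [] => none
  | w :: ws => if d.contains w then d.get? w else pvALoop d ws

def pick_path_column_py (cols : List String) : Option String :=
  let lower_to_actual := cols.foldl (fun d c => d.insert (PySem.Str.lower c) c) PySem.Dict.empty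
  pvALoop lower_to_actual pvCandidates

-- ===== PORT B =====
-- the priority dict {"root_path": 0, …, "root": 5}
def pvPriority : PySem.Dict String Nat :=
  PySem.Dict.ofList
    [("root_path", 0), ("watch_root", 1), ("path", 2), ("directory", 3), ("dir", 4), ("root", 5)]

-- one iteration of 'r = priority.get(c.lower()); if r is not None and (best is None or r <= best[1]): best = (c, r)'
def pvStep (best : Option (String × Nat)) (c : String) : Option (String × Nat) :=
  match pvPriority.get? (PySem.Str.lower c) with
  | none => best
  | some r =>
      match best with
      | none => some (c, r)
      | some b => if r ≤ b.2 then some (c, r) else best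

def pick_path_column_py_alt (cols : List String) : Option String :=
  match cols.foldl pvStep none with
  | some b => some b.1
  | none => none

-- ===== PRECONDITION & SPEC =====
def Spec_pick_path_column_py (cols : List String) (out : Option String) : Prop := out = pick_path_column_py_alt cols
instance (cols : List String) (out : Option String) : Decidable (Spec_pick_path_column_py cols out) := by unfold Spec_pick_path_column_py; infer_instance

-- ===== CLAIM (what is proved, stated in full; the proofs are below) =====
def Claim_equal_pick_path_column_py : Prop := ∀ (cols : List String), Dom_pick_path_column_py cols → Spec_pick_path_column_py cols (pick_path_column_py cols)

-- ===== LEMMAS AND PROOFS =====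

-- intermediate characterisation of A: per candidate, the last matching column is a reverse scan
def pvBLoop (cols : List String) : List String → Option String
  | [] => none
  | w :: ws =>
      match cols.reverse.find? (fun c => PySem.Str.lower c == w) with
      | some c => some c
      | none => pvBLoop cols ws

-- keep the accumulator only if its rank beats the bound m, and project the column
def pvSel (m : Nat) : Option (String × Nat) → Option String
  | some b => if b.2 < m then some b.1 else none
  | none => none

-- the fold-built dict looks up exactly as a reverse scan of cols does
theorem pv_get?_fold (cols : List String) (d : PySem.Dict String String) (w : String) :
    (cols.foldl (fun d c => d.insert (PySem.Str.lower c) c) d).get? w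
      = (match cols.reverse.find? (fun c => PySem.Str.lower c == w) with
         | some c => some c
         | none => d.get? w) := by
  induction cols generalizing d with
  | nil => simp
  | cons c rest ih =>
      simp only [List.foldl_cons, List.reverse_cons, List.find?_append, ih]
      cases h : rest.reverse.find? (fun c => PySem.Str.lower c == w) with
      | some x => simp
      | none =>
          simp only [Option.none_or]
          by_cases hw : PySem.Str.lower c = w
          · simp [hw, PySem.Dict.get?_insert_self]
          · have hb : (PySem.Str.lower c == w) = false := by simp [hw]
            simp [List.find?, hb, PySem.Dict.get?_insert_of_ne d c (Ne.symm hw)]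

-- A's loop over the candidate dict is pvBLoop
theorem pv_aloop_eq_bloop (cols ws : List String) :
    pvALoop (cols.foldl (fun d c => d.insert (PySem.Str.lower c) c) PySem.Dict.empty) ws
      = pvBLoop cols ws := by
  induction ws with
  | nil => rfl
  | cons w ws ih =>
      simp only [pvALoop, pvBLoop, PySem.Dict.contains_eq_isSome_get?, pv_get?_fold]
      cases h : cols.reverse.find? (fun c => PySem.Str.lower c == w) with
      | some x => simp
      | none => simpa using ih

-- the literal priority dict as a plain literal, and facts read off it
theorem pv_lit : pvPriority = PySem.Dict.mk
    [("root_path", 0), ("watch_root", 1), ("path", 2), ("directory", 3), ("dir", 4), ("root", 5)] := by decide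

theorem pv_rank_facts (s : String) (r : Nat) (h : pvPriority.get? s = some r) :
    r < 6 ∧ pvCandidates[r]? = some s ∧ s ∉ pvCandidates.take r := by
  rw [pv_lit] at h
  simp only [PySem.Dict.get?_mk_cons, beq_iff_eq] at h
  split_ifs at h with h0 h1 h2 h3 h4 h5
  · cases h; subst h0; exact ⟨by norm_num, rfl, by simp⟩
  · cases h; subst h1; exact ⟨by norm_num, rfl, by decide⟩
  · cases h; subst h2; exact ⟨by norm_num, rfl, by decide⟩
  · cases h; subst h3; exact ⟨by norm_num, rfl, by decide⟩
  · cases h; subst h4; exact ⟨by norm_num, rfl, by decide⟩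
  · cases h; subst h5; exact ⟨by norm_num, rfl, by decide⟩
  · simp [PySem.Dict.get?] at h

theorem pv_rank_none (s : String) (h : pvPriority.get? s = none) : s ∉ pvCandidates := by
  rw [pv_lit] at h
  simp only [PySem.Dict.get?_mk_cons, beq_iff_eq] at h
  split_ifs at h
  simp_all [pvCandidates, eq_comm]

theorem pv_bloop_nil (ws : List String) : pvBLoop [] ws = none := by
  induction ws with
  | nil => rfl
  | cons w ws ih => simp only [pvBLoop, List.reverse_nil, List.find?_nil]; exact ih

theorem pv_bloop_append (cols l1 l2 : List String) :
    pvBLoop cols (l1 ++ l2)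
      = (match pvBLoop cols l1 with | some x => some x | none => pvBLoop cols l2) := by
  induction l1 with
  | nil => simp [pvBLoop]
  | cons w l1 ih =>
      simp only [List.cons_append, pvBLoop, ih]
      cases cols.reverse.find? (fun c => PySem.Str.lower c == w) <;> rfl

-- appending a column whose lowercase name occurs in none of the candidates ws changes nothing
theorem pv_bloop_notmem (cols : List String) (c : String) (ws : List String)
    (h : PySem.Str.lower c ∉ ws) :
    pvBLoop (cols ++ [c]) ws = pvBLoop cols ws := by
  induction ws with
  | nil => rfl
  | cons w ws ih =>
      have hw : (PySem.Str.lower c == w) = false := by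
        simp only [List.mem_cons, not_or] at h; simp [h.1]
      simp only [pvBLoop, List.reverse_append, List.reverse_singleton, List.singleton_append,
        List.find?, hw]
      rw [ih (by intro hm; exact h (List.mem_cons_of_mem _ hm))]

-- the appended column is the last one, so it wins its own candidate immediately
theorem pv_bloop_hit (cols : List String) (c : String) (ws : List String) :
    pvBLoop (cols ++ [c]) (PySem.Str.lower c :: ws) = some c := by
  simp [pvBLoop, List.reverse_append]

-- decomposing the first m candidates around index r
theorem pv_take_decomp (l : List String) (r m : Nat) (hrm : r < m) (a : String)
    (h : l[r]? = some a) :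
    l.take m = l.take r ++ a :: (l.drop (r+1)).take (m - r - 1) := by
  have hr : r < l.length := by
    by_contra hc
    simp [List.getElem?_eq_none (by omega : l.length ≤ r)] at h
  have ha : l[r] = a := by simpa [List.getElem?_eq_getElem hr] using h
  have hm : m = r + (m - r) := by omega
  rw [hm, List.take_add, List.drop_eq_getElem_cons hr, ha]
  have hs : m - r = (m - r - 1) + 1 := by omega
  rw [hs, List.take_succ_cons]
  have h2 : r + (m - r - 1 + 1) - r - 1 = m - r - 1 := by omega
  rw [h2]

-- MAIN INVARIANT: A's scan of the first m candidates equals B's fold filtered below rank m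
theorem pv_main (cols : List String) :
    ∀ m : Nat, pvBLoop cols (pvCandidates.take m) = pvSel m (cols.foldl pvStep none) := by
  induction cols using List.reverseRecOn with
  | nil => intro m; simp [pv_bloop_nil, pvSel]
  | append_singleton cols c ih =>
      intro m
      rw [List.foldl_append, List.foldl_cons, List.foldl_nil]
      cases h : pvPriority.get? (PySem.Str.lower c) with
      | none =>
          have hnot := pv_rank_none _ h
          rw [pv_bloop_notmem cols c _ (fun hm => hnot (List.mem_of_mem_take hm)), ih m]
          have hstep : pvStep (cols.foldl pvStep none) c = cols.foldl pvStep none := by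
            cases hf : cols.foldl pvStep none <;> simp [pvStep, h]
          rw [hstep]
      | some r =>
          obtain ⟨hr6, hget, hnotmem⟩ := pv_rank_facts _ _ h
          have hstep : pvStep (cols.foldl pvStep none) c
              = (match cols.foldl pvStep none with
                 | none => some (c, r)
                 | some b => if r ≤ b.2 then some (c, r) else some b) := by
            cases hf : cols.foldl pvStep none <;> simp [pvStep, h]
          by_cases hrm : r < m
          · rw [pv_take_decomp pvCandidates r m hrm _ hget, pv_bloop_append,
              pv_bloop_notmem cols c _ hnotmem, ih r, pv_bloop_hit, hstep]
            cases hf : cols.foldl pvStep none with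
            | none => simp [pvSel, hrm]
            | some b =>
                by_cases hbr : b.2 < r
                · have : ¬ r ≤ b.2 := by omega
                  simp [pvSel, hbr, this, (show b.2 < m by omega)]
                · have : r ≤ b.2 := by omega
                  simp [pvSel, hbr, this, hrm]
          · have hmr : m ≤ r := by omega
            have hsub : PySem.Str.lower c ∉ pvCandidates.take m := by
              intro hm
              have heq : List.take m pvCandidates = List.take m (List.take r pvCandidates) := by
                rw [List.take_take, Nat.min_eq_left hmr]
              exact hnotmem (List.mem_of_mem_take (heq ▸ hm))
            rw [pv_bloop_notmem cols c _ hsub, ih m, hstep]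
            cases hf : cols.foldl pvStep none with
            | none => simp [pvSel, (show ¬ r < m by omega)]
            | some b =>
                by_cases hle : r ≤ b.2
                · simp [pvSel, hle, (show ¬ r < m by omega), (show ¬ b.2 < m by omega)]
                · simp [pvSel, hle]

-- every rank the fold can store is < 6
theorem pv_rank_lt (cols : List String) (acc : Option (String × Nat))
    (hacc : ∀ b, acc = some b → b.2 < 6) :
    ∀ b, cols.foldl pvStep acc = some b → b.2 < 6 := by
  induction cols generalizing acc with
  | nil => simpa using hacc
  | cons c rest ih =>
      refine ih _ ?_
      intro b hb
      cases h : pvPriority.get? (PySem.Str.lower c) with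
      | none => simp only [pvStep, h] at hb; exact hacc b hb
      | some r =>
          simp only [pvStep, h] at hb
          have hr := (pv_rank_facts _ _ h).1
          cases acc with
          | none => cases hb; simpa using hr
          | some a =>
              simp only at hb
              split at hb
              · cases hb; simpa using hr
              · exact hacc b hb

-- ===== VERDICT (by name: the statement is the Claim_ definition above) =====
theorem pick_path_column_py_spec : Claim_equal_pick_path_column_py := by
  intro cols _
  unfold Spec_pick_path_column_py pick_path_column_py pick_path_column_py_alt
  rw [pv_aloop_eq_bloop]
  have h6 : pvCandidates = pvCandidates.take 6 := rfl
  rw [h6, pv_main cols 6]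
  cases h : cols.foldl pvStep none with
  | none => rfl
  | some b =>
      have := pv_rank_lt cols none (by simp) b h
      simp [pvSel, this]
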